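-- pv_equiv track=rewrite | github.com/ChoiYoo/Practice | ZB/5차/3번.py | solution
-- ===== SOURCE A (Python) =====
-- def solution(arr):
--     answer = -1
--     new = []
--     for a in range(len(arr)):
--         new.append([arr[a], a])
--     max_num = max(new)
--     if max_num[1] != 0 and max_num[1] != len(arr)-1:
--         answer = max_num[1]
--     return answer
-- ===== SOURCE B (Python) =====
-- def solution(arr):
--     order = sorted(range(len(arr)), key=lambda i: (arr[i], i))
--     idx = order[-1]
--     return -1 if idx == 0 or idx == len(arr) - 1 else idx
-- ===== Notes on version B (the rewrite author's own statement) =====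
-- stated objective: alternative
-- what changed: B ranks all indices by sorting them with key (value, index) and takes the last element of the ranking, instead of A's building a [value,index] pair list and scanning it with a running lexicographic max; sort-based selection replaces the linear scan.
import Mathlib
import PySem

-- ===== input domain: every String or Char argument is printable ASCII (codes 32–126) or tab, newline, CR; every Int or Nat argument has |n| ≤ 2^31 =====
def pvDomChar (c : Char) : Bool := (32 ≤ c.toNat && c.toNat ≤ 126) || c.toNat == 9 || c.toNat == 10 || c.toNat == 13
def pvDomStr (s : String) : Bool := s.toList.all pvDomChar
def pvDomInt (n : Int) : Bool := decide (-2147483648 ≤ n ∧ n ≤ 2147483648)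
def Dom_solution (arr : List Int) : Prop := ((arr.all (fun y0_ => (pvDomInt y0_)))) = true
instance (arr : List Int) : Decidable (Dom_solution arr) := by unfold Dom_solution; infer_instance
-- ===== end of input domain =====

-- B replaces A's pair-list + running lexicographic max with sort-based selection: rank all indices by (value, index), take the last.

-- ===== PORT A =====
-- hand port of Python's 'max' comparison on two-element lists [v, i]: lexicographic; exact here
def pairGt (x m : Int × Int) : Bool := x.1 > m.1 || (x.1 == m.1 && x.2 > m.2)

def solution (arr : List Int) : Int :=
  let answer : Int := -1
  let new : List (Int × Int) :=
    (PySem.List.pyRange 0 arr.length 1).foldl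
      (fun acc a => acc ++ [(PySem.List.pyGetD arr a 0, a)]) []
  match new with
  | [] => answer                  -- Python: max([]) raises ValueError; excluded by Pre_solution
  | h :: t =>
    let max_num := t.foldl (fun m x => if pairGt x m then x else m) h
    if max_num.2 ≠ 0 ∧ max_num.2 ≠ (arr.length : Int) - 1 then max_num.2 else answer

-- ===== PORT B =====
-- Python's tuple key (arr[i], i) is ported with the lexicographic order Int ×ₗ Int (exactly Python's tuple comparison on ints)
def solution_alt (arr : List Int) : Int :=
  let order := PySem.List.sorted (PySem.List.pyRange 0 arr.length 1)
      (fun i => toLex (PySem.List.pyGetD arr i 0, i))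
  match PySem.List.pyGet? order (-1) with
  | none => -1                    -- empty list: Python's order[-1] raises IndexError; excluded by Pre_solution
  | some idx => if idx = 0 ∨ idx = (arr.length : Int) - 1 then -1 else idx

-- ===== PRECONDITION & SPEC =====
-- Pre_ excludes only the empty list, on which Python A's max([]) raises ValueError (and B's order[-1] raises IndexError).
def Pre_solution (arr : List Int) : Prop := arr ≠ []
instance (arr : List Int) : Decidable (Pre_solution arr) := by unfold Pre_solution; infer_instance
def pvWitness_solution : List Int := [3, 7, 5]

def Spec_solution (arr : List Int) (out : Int) : Prop := out = solution_alt arr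
instance (arr : List Int) (out : Int) : Decidable (Spec_solution arr out) := by unfold Spec_solution; infer_instance

-- ===== CLAIM (what is proved, stated in full; the proofs are below) =====
def Claim_equal_solution : Prop := ∀ (arr : List Int), Dom_solution arr → Pre_solution arr → Spec_solution arr (solution arr)

-- ===== LEMMAS AND PROOFS =====

def lexLe (q r : Int × Int) : Prop := q.1 < r.1 ∨ (q.1 = r.1 ∧ q.2 ≤ r.2)

theorem lexLe_refl (q : Int × Int) : lexLe q q := Or.inr ⟨rfl, le_refl _⟩

theorem lexLe_trans {a b c : Int × Int} (h1 : lexLe a b) (h2 : lexLe b c) : lexLe a c := by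
  unfold lexLe at *; rcases h1 with h1 | ⟨h1, h1'⟩ <;> rcases h2 with h2 | ⟨h2, h2'⟩ <;> omega

theorem lexLe_antisymm {a b : Int × Int} (h1 : lexLe a b) (h2 : lexLe b a) : a = b := by
  unfold lexLe at *
  have : a.1 = b.1 ∧ a.2 = b.2 := by
    rcases h1 with h1 | ⟨h1, h1'⟩ <;> rcases h2 with h2 | ⟨h2, h2'⟩ <;> omega
  exact Prod.ext this.1 this.2

theorem lexLe_of_pairGt {x m : Int × Int} (h : pairGt x m = true) : lexLe m x := by
  unfold pairGt at h; unfold lexLe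
  simp only [Bool.or_eq_true, Bool.and_eq_true, decide_eq_true_eq, beq_iff_eq] at h
  omega

theorem lexLe_of_not_pairGt {x m : Int × Int} (h : pairGt x m = false) : lexLe x m := by
  unfold pairGt at h; unfold lexLe
  simp only [Bool.or_eq_false_iff, Bool.and_eq_false_iff, decide_eq_false_iff_not, beq_eq_false_iff_ne] at h
  rcases h with ⟨h1, h2⟩
  rcases h2 with h2 | h2 <;> omega

theorem fold_max_spec (t : List (Int × Int)) : ∀ (h : Int × Int),
    (t.foldl (fun m x => if pairGt x m then x else m) h) ∈ h :: t ∧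
    ∀ q ∈ h :: t, lexLe q (t.foldl (fun m x => if pairGt x m then x else m) h) := by
  induction t with
  | nil =>
    intro h
    exact ⟨List.mem_singleton.mpr rfl, by intro q hq; simp at hq; subst hq; exact lexLe_refl q⟩
  | cons x t ih =>
    intro h
    simp only [List.foldl_cons]
    obtain ⟨hmem, hmax⟩ := ih (if pairGt x h then x else h)
    constructor
    · rcases List.mem_cons.mp hmem with he | ht
      · rw [he]; split <;> simp
      · simp [ht]
    · intro q hq
      have hh' : lexLe h (if pairGt x h then x else h) := by
        split
        · exact lexLe_of_pairGt (by assumption)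
        · exact lexLe_refl h
      have hx' : lexLe x (if pairGt x h then x else h) := by
        split
        · exact lexLe_refl x
        · exact lexLe_of_not_pairGt (by simp_all)
      have hhead := hmax _ (List.mem_cons_self)
      rcases List.mem_cons.mp hq with he | hq'
      · rw [he]; exact lexLe_trans hh' hhead
      · rcases List.mem_cons.mp hq' with he | hq''
        · rw [he]; exact lexLe_trans hx' hhead
        · exact hmax q (List.mem_cons_of_mem _ hq'')

-- the pair list A builds, in closed form
theorem new_eq (arr : List Int) :
    (PySem.List.pyRange 0 arr.length 1).foldl
      (fun acc a => acc ++ [(PySem.List.pyGetD arr a 0, a)]) []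
    = (List.range arr.length).map (fun k => (arr.getD k 0, (k : Int))) := by
  rw [PySem.List.foldl_append_singleton_eq_map, List.nil_append, PySem.List.pyRange_one, List.map_map]
  simp only [Int.sub_zero, Int.toNat_natCast]
  apply List.map_congr_left
  intro k _
  simp [PySem.List.pyGetD_natCast]

-- B's index list, in closed form
theorem range_eq (arr : List Int) :
    PySem.List.pyRange 0 arr.length 1 = (List.range arr.length).map (fun k : Nat => (k : Int)) := by
  rw [PySem.List.pyRange_one]
  simp only [Int.sub_zero, Int.toNat_natCast]
  exact List.map_congr_left (fun k _ => by omega)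

theorem solution_spec' (arr : List Int) (hpre : arr ≠ []) : solution arr = solution_alt arr := by
  -- m : the maximum value, i0 : the last index where it occurs
  obtain ⟨m, hm⟩ : ∃ m, PySem.List.max? arr id = some m := by
    cases hmx : PySem.List.max? arr id with
    | none => exact absurd ((PySem.List.max?_eq_none_iff arr id).mp hmx) hpre
    | some m => exact ⟨m, rfl⟩
  have hmmem : m ∈ arr := PySem.List.max?_mem hm
  have hmmax : ∀ y ∈ arr, y ≤ m := by
    intro y hy; exact PySem.List.max?_isMax hm y hy
  obtain ⟨j, hj⟩ : ∃ j, PySem.List.index? arr.reverse m = some j := by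
    cases hix : PySem.List.index? arr.reverse m with
    | none =>
      exact absurd (List.mem_reverse.mpr hmmem)
        ((PySem.List.index?_eq_none_iff arr.reverse m).mp hix)
    | some j => exact ⟨j, rfl⟩
  obtain ⟨hjlt, hjget, hjfirst⟩ := PySem.List.getElem_of_index?_eq_some hj
  rw [List.length_reverse] at hjlt
  set n := arr.length with hn
  have hnpos : 0 < n := List.length_pos_of_ne_nil hpre
  set i0 : Nat := n - 1 - j with hi0
  have hi0lt : i0 < n := by omega
  have hget_i0 : arr[i0]'hi0lt = m := by
    have := hjget
    rw [List.getElem_reverse] at this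
    simpa [hi0] using this
  have hafter : ∀ k (hk : k < n), i0 < k → arr[k]'hk ≠ m := by
    intro k hk hik
    have hk' : n - 1 - k < j := by omega
    have h1 := hjfirst (n - 1 - k) hk'
    rw [List.getElem_reverse] at h1
    simpa [show arr.length - 1 - (n - 1 - k) = k from by omega] using h1
  -- ===== A's side: the fold over the pair list returns (m, i0) =====
  have hnew := new_eq arr
  set new := (List.range arr.length).map (fun k => (arr.getD k 0, (k : Int))) with hnewdef
  have hmemnew : ∀ p ∈ new, ∃ k, ∃ hk : k < n, p = (arr[k]'hk, (k : Int)) := by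
    intro p hp
    rw [hnewdef, List.mem_map] at hp
    obtain ⟨k, hk, hpk⟩ := hp
    rw [List.mem_range] at hk
    exact ⟨k, hk, by rw [← hpk]; simp [List.getD_eq_getElem?_getD, List.getElem?_eq_getElem hk]⟩
  have hcand_mem : ((m, (i0 : Int)) : Int × Int) ∈ new := by
    rw [hnewdef, List.mem_map]
    exact ⟨i0, List.mem_range.mpr hi0lt,
      by simp [List.getD_eq_getElem?_getD, List.getElem?_eq_getElem hi0lt, hget_i0]⟩
  have hcand_max : ∀ q ∈ new, lexLe q (m, (i0 : Int)) := by
    intro q hq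
    obtain ⟨k, hk, hqk⟩ := hmemnew q hq
    subst hqk
    have hle : arr[k]'hk ≤ m := hmmax _ (List.getElem_mem hk)
    by_cases heq : arr[k]'hk = m
    · have hki : k ≤ i0 := by
        by_contra hgt
        exact hafter k hk (by omega) heq
      exact Or.inr ⟨heq, by simpa using hki⟩
    · refine Or.inl ?_
      show arr[k]'hk < m
      omega
  unfold solution
  rw [hnew]
  have hne : new ≠ [] := fun h => by
    rw [h] at hcand_mem; exact List.not_mem_nil hcand_mem
  obtain ⟨h, t, hht⟩ := List.exists_cons_of_ne_nil hne
  rw [hht]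
  simp only
  obtain ⟨hfmem, hfmax⟩ := fold_max_spec t h
  set r := t.foldl (fun m x => if pairGt x m then x else m) h with hr
  have hreq : r = (m, (i0 : Int)) := by
    apply lexLe_antisymm
    · exact hcand_max r (hht ▸ hfmem)
    · exact hfmax _ (hht ▸ hcand_mem)
  -- ===== B's side: the last element of the sorted index ranking is i0 =====
  unfold solution_alt
  set key : Int → Lex (Int × Int) := fun i => toLex (PySem.List.pyGetD arr i 0, i) with hkey
  set R := PySem.List.pyRange 0 (arr.length : Int) 1 with hR
  set L := PySem.List.sorted R key with hL
  have hperm : L.Perm R := PySem.List.sorted_perm R key false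
  have hRlen : R.length = n := by rw [hR, range_eq]; simp [hn]
  have hLlen : L.length = n := by rw [hperm.length_eq, hRlen]
  -- keys of the index list, in terms of arr
  have hkeyval : ∀ k : Nat, key (k : Int) = toLex (arr.getD k 0, (k : Int)) := by
    intro k
    simp only [hkey, PySem.List.pyGetD_natCast]
  have hgetD : ∀ k : Nat, ∀ hk : k < n, arr.getD k 0 = arr[k]'(hn ▸ hk) := by
    intro k hk
    rw [List.getD_eq_getElem?_getD, List.getElem?_eq_getElem (hn ▸ hk)]
    rfl
  have hgm : arr.getD i0 0 = m := by rw [hgetD i0 hi0lt]; exact hget_i0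
  have hgle : ∀ k : Nat, k < n → arr.getD k 0 ≤ m := by
    intro k hk
    rw [hgetD k hk]; exact hmmax _ (List.getElem_mem _)
  have hglast : ∀ k : Nat, k < n → i0 < k → arr.getD k 0 ≠ m := by
    intro k hk hik
    rw [hgetD k hk]; exact hafter k (hn ▸ hk) hik
  -- the last element of L
  have hn1 : n - 1 < L.length := by rw [hLlen]; omega
  have hget : PySem.List.pyGet? L (-1) = some (L[n-1]'hn1) := by
    simp only [PySem.List.pyGet?, PySem.List.pyIdx?, hLlen]
    have h1 : ¬ (0 : Int) ≤ -1 := by omega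
    have h2 : -(n : Int) ≤ -1 := by omega
    rw [if_neg h1, if_pos h2]
    have h3 : (-(-1 : Int)).toNat = 1 := by decide
    simp only [h3, Option.bind]
    rw [List.getElem?_eq_getElem hn1]
  set e : Int := L[n-1]'hn1 with he
  -- e ∈ R, so e = (k0 : Int) for some k0 < n
  have heR : e ∈ R := hperm.mem_iff.mp (by rw [he]; exact List.getElem_mem _)
  obtain ⟨k0, hk0, hek0⟩ : ∃ k0 : Nat, ∃ _ : k0 < n, e = (k0 : Int) := by
    rw [hR, range_eq] at heR
    obtain ⟨k0, hk0, hk0e⟩ := List.mem_map.mp heR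
    exact ⟨k0, List.mem_range.mp hk0, hk0e.symm⟩
  -- every element of L has key ≤ key e
  have hmaxkey : ∀ x ∈ L, key x ≤ key e := by
    intro x hx
    obtain ⟨p, hp, hpx⟩ := List.getElem_of_mem hx
    have hp' : p ≤ n - 1 := by rw [hLlen] at hp; omega
    rw [← hpx, he]
    exact PySem.List.key_sorted_getElem_mono R key hp' hn1
  -- key i0 ≤ key e, and key e ≤ key i0 since (m, i0) is the lex max; hence e = i0
  have hi0R : ((i0 : Nat) : Int) ∈ L := hperm.mem_iff.mpr (by
    rw [hR, range_eq]; exact List.mem_map.mpr ⟨i0, List.mem_range.mpr hi0lt, rfl⟩)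
  have h1 : key (i0 : Int) ≤ key e := hmaxkey _ hi0R
  have h2 : key e ≤ key (i0 : Int) := by
    rw [hek0, hkeyval k0, hkeyval i0, Prod.Lex.toLex_le_toLex]
    have hle : arr.getD k0 0 ≤ m := hgle k0 hk0
    by_cases heq : arr.getD k0 0 = m
    · have hki : k0 ≤ i0 := by
        by_contra hgt
        exact hglast k0 hk0 (by omega) heq
      exact Or.inr ⟨by rw [heq, hgm], by simpa using hki⟩
    · exact Or.inl (by rw [hgm]; exact lt_of_le_of_ne hle heq)
  have hei0 : e = (i0 : Int) := by
    have hkeq := le_antisymm h2 h1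
    rw [hek0, hkeyval k0, hkeyval i0] at hkeq
    have ha := Prod.Lex.toLex_le_toLex.mp hkeq.le
    have hb := Prod.Lex.toLex_le_toLex.mp hkeq.ge
    simp only at ha hb
    rw [hek0]
    omega
  -- assemble both sides
  simp only [hget, hreq, hei0]
  by_cases h0 : ((i0 : Nat) : Int) = 0 ∨ ((i0 : Nat) : Int) = (arr.length : Int) - 1
  · rw [if_pos h0, if_neg (by tauto)]
  · rw [if_neg h0, if_pos (by tauto)]

-- ===== VERDICT (by name: the statement is the Claim_ definition above) =====
theorem solution_spec : Claim_equal_solution := by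
  intro arr _ hpre
  exact solution_spec' arr hpre
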